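-- pv_equiv track=rewrite | github.com/vacp2p/nim-libp2p | scripts/build_libp2p_minver.py | classify_dependencies
-- ===== SOURCE A (Python) =====
-- eq_symbols = ("#", "==")
--
-- def contains_eq_symbol(_dependency: str) -> bool:
--     return any((eq_symbol in _dependency for eq_symbol in eq_symbols))
--
-- def classify_dependency(_dependency: str) -> str:
--     if contains_eq_symbol(_dependency):
--         return "eq"
--     elif ">" in _dependency:
--         return "gt"
--     else:
--         return ""
--
-- def classify_dependencies(_dependencies: list[str]) -> dict[str, list[str]]:
--     d = {
--         "eq": [],
--         "gt": [],
--         "": [],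
--     }
--     for _dependency in _dependencies:
--         d[classify_dependency(_dependency)].append(_dependency)
--     return d
-- ===== SOURCE B (Python) =====
-- def _is_eq(d: str) -> bool:
--     return "#" in d or "==" in d
--
-- def classify_dependencies(_dependencies: list[str]) -> dict[str, list[str]]:
--     return {
--         "eq": [d for d in _dependencies if _is_eq(d)],
--         "gt": [d for d in _dependencies if not _is_eq(d) and ">" in d],
--         "": [d for d in _dependencies if not _is_eq(d) and ">" not in d],
--     }
-- ===== Notes on version B (the rewrite author's own statement) =====
-- stated objective: simpler
-- what changed: Replaces the single dispatch loop that appends into a pre-seeded mutable dict with three independent filtering comprehensions, one per bucket, assembled directly into the result dict.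
import Mathlib
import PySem

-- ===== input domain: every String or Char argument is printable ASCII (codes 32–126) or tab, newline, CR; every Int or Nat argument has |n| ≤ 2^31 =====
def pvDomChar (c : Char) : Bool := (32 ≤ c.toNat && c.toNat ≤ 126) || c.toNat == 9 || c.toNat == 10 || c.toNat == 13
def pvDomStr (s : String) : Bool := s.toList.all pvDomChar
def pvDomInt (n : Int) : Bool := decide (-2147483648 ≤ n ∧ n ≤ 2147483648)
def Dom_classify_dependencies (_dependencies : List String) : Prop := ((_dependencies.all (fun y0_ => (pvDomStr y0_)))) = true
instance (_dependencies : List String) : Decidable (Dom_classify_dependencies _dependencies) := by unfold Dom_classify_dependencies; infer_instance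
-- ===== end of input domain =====

-- B replaces A's single dispatch loop into a pre-seeded dict with three filtering passes, one per bucket (objective: simpler).


-- ===== PORT A =====
-- contains_eq_symbol: any(eq_symbol in _dependency for eq_symbol in eq_symbols)
def contains_eq_symbol (_dependency : String) : Bool :=
  ["#", "=="].any (fun eq_symbol => PySem.Str.isIn eq_symbol _dependency)

def classify_dependency (_dependency : String) : String :=
  if contains_eq_symbol _dependency then "eq"
  else if PySem.Str.isIn ">" _dependency then "gt"
  else ""

def classify_dependencies (_dependencies : List String) : List (String × List String) :=
  (_dependencies.foldl
    (fun d _dependency => d.modify (classify_dependency _dependency) [] (fun l => l ++ [_dependency]))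
    (((PySem.Dict.empty.insert "eq" []).insert "gt" []).insert "" [])).items

-- ===== PORT B =====
def pvIsEq (d : String) : Bool := PySem.Str.isIn "#" d || PySem.Str.isIn "==" d

def classify_dependencies_alt (_dependencies : List String) : List (String × List String) :=
  [("eq", _dependencies.filter (fun d => pvIsEq d)),
   ("gt", _dependencies.filter (fun d => !pvIsEq d && PySem.Str.isIn ">" d)),
   ("", _dependencies.filter (fun d => !pvIsEq d && !PySem.Str.isIn ">" d))]

-- ===== PRECONDITION & SPEC =====
def Spec_classify_dependencies (_dependencies : List String) (out : List (String × List String)) : Prop := out = classify_dependencies_alt _dependencies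
instance (_dependencies : List String) (out : List (String × List String)) : Decidable (Spec_classify_dependencies _dependencies out) := by unfold Spec_classify_dependencies; infer_instance

-- ===== CLAIM (what is proved, stated in full; the proofs are below) =====
def Claim_equal_classify_dependencies : Prop := ∀ (_dependencies : List String), Dom_classify_dependencies _dependencies → Spec_classify_dependencies _dependencies (classify_dependencies _dependencies)

-- ===== LEMMAS AND PROOFS =====

theorem loop_invariant (xs : List String) (e g o : List String) :
    (xs.foldl
      (fun d x => d.modify (classify_dependency x) [] (fun l => l ++ [x]))
      (PySem.Dict.mk [("eq", e), ("gt", g), ("", o)])).items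
    = [("eq", e ++ xs.filter (fun d => pvIsEq d)),
       ("gt", g ++ xs.filter (fun d => !pvIsEq d && PySem.Str.isIn ">" d)),
       ("", o ++ xs.filter (fun d => !pvIsEq d && !PySem.Str.isIn ">" d))] := by
  induction xs generalizing e g o with
  | nil => simp
  | cons x xs ih =>
    have hcs : contains_eq_symbol x
        = (PySem.Chars.isIn ['#'] x.toList || PySem.Chars.isIn ['=', '='] x.toList) := by
      simp [contains_eq_symbol]
    have hpv : pvIsEq x
        = (PySem.Chars.isIn ['#'] x.toList || PySem.Chars.isIn ['=', '='] x.toList) := by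
      simp [pvIsEq]
    by_cases hE : (PySem.Chars.isIn ['#'] x.toList || PySem.Chars.isIn ['=', '='] x.toList) = true
    · have hc : classify_dependency x = "eq" := by
        simp [classify_dependency, hcs, hE]
      simp only [List.foldl_cons, hc]
      have hstep : (PySem.Dict.mk [("eq", e), ("gt", g), ("", o)]).modify "eq" [] (fun l => l ++ [x])
           = PySem.Dict.mk [("eq", e ++ [x]), ("gt", g), ("", o)] := by
        simp [PySem.Dict.modify, PySem.Dict.contains, PySem.Dict.getD, PySem.Dict.get?, PySem.Dict.insert]
      rw [hstep, ih]
      simp [List.filter, hpv, hE]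
    · have hE' := eq_false_of_ne_true hE
      by_cases hG : PySem.Chars.isIn ['>'] x.toList = true
      · have hc : classify_dependency x = "gt" := by
          simp [classify_dependency, hcs, hE', hG]
        simp only [List.foldl_cons, hc]
        have hstep : (PySem.Dict.mk [("eq", e), ("gt", g), ("", o)]).modify "gt" [] (fun l => l ++ [x])
             = PySem.Dict.mk [("eq", e), ("gt", g ++ [x]), ("", o)] := by
          simp [PySem.Dict.modify, PySem.Dict.contains, PySem.Dict.getD, PySem.Dict.get?, PySem.Dict.insert]
        rw [hstep, ih]
        simp [List.filter, hpv, hE', hG]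
      · have hG' := eq_false_of_ne_true hG
        have hc : classify_dependency x = "" := by
          simp [classify_dependency, hcs, hE', hG']
        simp only [List.foldl_cons, hc]
        have hstep : (PySem.Dict.mk [("eq", e), ("gt", g), ("", o)]).modify "" [] (fun l => l ++ [x])
             = PySem.Dict.mk [("eq", e), ("gt", g), ("", o ++ [x])] := by
          simp [PySem.Dict.modify, PySem.Dict.contains, PySem.Dict.getD, PySem.Dict.get?, PySem.Dict.insert]
        rw [hstep, ih]
        simp [List.filter, hpv, hE', hG']

-- ===== VERDICT (by name: the statement is the Claim_ definition above) =====
theorem classify_dependencies_spec : Claim_equal_classify_dependencies := by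
  intro xs _
  show classify_dependencies xs = classify_dependencies_alt xs
  have hinit : (((PySem.Dict.empty.insert "eq" ([] : List String)).insert "gt" []).insert "" [])
      = PySem.Dict.mk [("eq", []), ("gt", []), ("", [])] := by decide
  unfold classify_dependencies classify_dependencies_alt
  rw [hinit, loop_invariant]
  simp
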